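-- pv_equiv track=rewrite | github.com/AugustDanell/Kattis-Assignments | Python/interplanataryTunnels.py | BFS
-- ===== SOURCE A (Python) =====
-- from collections import deque
--
-- def BFS(start, end, adjList):
--     toVisit = deque([[start, 0]])
--     visited = {}
--     while(len(toVisit) > 0):
--         currentPackage = toVisit.popleft()
--         currentPlanet = currentPackage[0]
--         currentDepth = currentPackage[1]
--
--         if(currentPlanet == end):
--             return currentDepth
--         elif currentPlanet in adjList:
--             for nextNode in adjList[currentPlanet]:
--                 if(nextNode not in visited):
--                     visited[nextNode] = True
--                     nextPackage = [nextNode, currentDepth+1]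
--                     toVisit.append(nextPackage)
-- ===== SOURCE B (Python) =====
-- def BFS(start, end, adjList):
--     # Level-by-level BFS: a frontier list plus a depth counter instead of (node, depth) pairs in a deque.
--     frontier = [start]
--     depth = 0
--     visited = set()
--     while frontier:
--         if end in frontier:
--             return depth
--         nextFrontier = []
--         for node in frontier:
--             if node in adjList:
--                 for nb in adjList[node]:
--                     if nb not in visited:
--                         visited.add(nb)
--                         nextFrontier.append(nb)
--         frontier = nextFrontier
--         depth += 1
--     return None
-- ===== Notes on version B (the rewrite author's own statement) =====
-- stated objective: alternative
-- what changed: Replaces the deque of (node, depth) pairs by level-by-level BFS: a frontier list plus an integer depth counter, expanding one whole level per outer iteration and checking membership of the target in the frontier.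
import Mathlib
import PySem

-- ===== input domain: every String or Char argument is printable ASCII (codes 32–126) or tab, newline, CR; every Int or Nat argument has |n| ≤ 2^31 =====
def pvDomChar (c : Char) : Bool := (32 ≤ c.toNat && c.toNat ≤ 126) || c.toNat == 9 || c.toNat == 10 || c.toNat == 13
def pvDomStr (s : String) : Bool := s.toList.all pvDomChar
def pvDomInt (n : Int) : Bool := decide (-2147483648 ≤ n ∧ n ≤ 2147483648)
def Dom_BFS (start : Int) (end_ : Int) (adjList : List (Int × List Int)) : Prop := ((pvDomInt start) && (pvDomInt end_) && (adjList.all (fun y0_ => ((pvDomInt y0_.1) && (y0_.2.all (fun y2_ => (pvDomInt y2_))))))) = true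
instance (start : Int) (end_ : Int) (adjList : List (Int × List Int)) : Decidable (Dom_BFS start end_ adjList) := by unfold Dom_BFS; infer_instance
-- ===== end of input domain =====

-- B replaces A's deque of (node, depth) pairs by level-by-level BFS (frontier list + depth counter); same return value, no speed claim.

-- shared dict-lookup primitive: 'node in adjList' / 'adjList[node]' (first-match association lookup)
def pvAdjGet (adjList : List (Int × List Int)) (k : Int) : Option (List Int) :=
  (List.find? (fun p => p.1 == k) adjList).map (fun p => p.2)

-- termination measure helper: number of potential-neighbour nodes not yet seen
def pvCands (adjList : List (Int × List Int)) : List Int :=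
  PySem.List.dedup (adjList.flatMap Prod.snd)

def pvRem (adjList : List (Int × List Int)) (seen : List Int) : Nat :=
  ((pvCands adjList).filter (fun c => !seen.contains c)).length

lemma pvFilterSnoc (c : Int) (seen : List Int) (hs : c ∉ seen) :
    ∀ (l : List Int), l.Nodup → c ∈ l →
    (l.filter (fun x => !(seen ++ [c]).contains x)).length + 1
      = (l.filter (fun x => !seen.contains x)).length := by
  intro l
  induction l with
  | nil => intro _ h; cases h
  | cons a l ih =>
    intro hnd hmem
    rcases List.nodup_cons.mp hnd with ⟨hal, hndl⟩
    by_cases hca : c = a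
    · subst hca
      have h3 : l.filter (fun x => !(seen ++ [c]).contains x)
          = l.filter (fun x => !seen.contains x) := by
        apply List.filter_congr
        intro x hx
        have hxc : x ≠ c := fun h => hal (h ▸ hx)
        simp [hxc]
      rw [List.filter_cons, List.filter_cons, h3]
      simp [hs]
    · have hcl : c ∈ l := by
        rcases List.mem_cons.mp hmem with h | h
        · exact absurd h hca
        · exact h
      have ha : ((seen ++ [c]).contains a) = (seen.contains a) := by
        have : a ≠ c := fun h => hca h.symm
        simp [this]
      by_cases hsa : seen.contains a
      · simp only [List.filter_cons, ha, hsa]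
        simpa using ih hndl hcl
      · simp only [List.filter_cons, ha, hsa]
        simp only [Bool.not_false, if_true, List.length_cons]
        have := ih hndl hcl
        omega

lemma pvRem_snoc (adjList : List (Int × List Int)) (seen : List Int) (c : Int)
    (hc : c ∈ adjList.flatMap Prod.snd) (hs : c ∉ seen) :
    pvRem adjList (seen ++ [c]) + 1 = pvRem adjList seen := by
  have hmem : c ∈ pvCands adjList := by
    simpa [pvCands, PySem.List.mem_dedup] using hc
  have hnd : (pvCands adjList).Nodup := by
    simpa [pvCands] using PySem.List.nodup_dedup (adjList.flatMap Prod.snd)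
  exact pvFilterSnoc c seen hs (pvCands adjList) hnd hmem

lemma pvAdjGet_subset (adjList : List (Int × List Int)) (k : Int) (nbs : List Int)
    (h : pvAdjGet adjList k = some nbs) : ∀ x ∈ nbs, x ∈ adjList.flatMap Prod.snd := by
  intro x hx
  unfold pvAdjGet at h
  rcases Option.map_eq_some_iff.mp h with ⟨p, hp, hsnd⟩
  exact List.mem_flatMap.mpr ⟨p, List.mem_of_find?_eq_some hp, hsnd ▸ hx⟩

-- ===== PORT A =====
-- body of A's inner 'for nextNode in adjList[currentPlanet]' loop
def BFSvisitA (d : Int) (st : List (Int × Int) × PySem.Dict Int Bool) (nb : Int) :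
    List (Int × Int) × PySem.Dict Int Bool :=
  if st.2.contains nb then st else (st.1 ++ [(nb, d + 1)], st.2.insert nb true)

lemma foldA_bound (adjList : List (Int × List Int)) (d : Int) :
    ∀ (nbs : List Int) (q : List (Int × Int)) (v : PySem.Dict Int Bool),
    (∀ x ∈ nbs, x ∈ adjList.flatMap Prod.snd) →
    2 * pvRem adjList (List.foldl (BFSvisitA d) (q, v) nbs).2.keys
        + (List.foldl (BFSvisitA d) (q, v) nbs).1.length
      ≤ 2 * pvRem adjList v.keys + q.length := by
  intro nbs
  induction nbs with
  | nil => intro q v _; simp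
  | cons nb nbs ih =>
    intro q v hsub
    simp only [List.foldl_cons]
    by_cases hc : v.contains nb = true
    · simp only [BFSvisitA, hc, if_true]
      exact ih q v (fun x hx => hsub x (List.mem_cons_of_mem _ hx))
    · simp only [BFSvisitA, hc, if_false, Bool.false_eq_true]
      have hkeys : (v.insert nb true).keys = v.keys ++ [nb] :=
        PySem.Dict.keys_insert_of_not_contains _ _ (by simpa using hc)
      have hnotmem : nb ∉ v.keys := by
        intro hm
        exact hc ((PySem.Dict.contains_iff_mem_keys _ _).mpr hm)
      have hrem : pvRem adjList (v.keys ++ [nb]) + 1 = pvRem adjList v.keys :=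
        pvRem_snoc adjList v.keys nb (hsub nb (List.mem_cons_self)) hnotmem
      have := ih (q ++ [(nb, d + 1)]) (v.insert nb true)
        (fun x hx => hsub x (List.mem_cons_of_mem _ hx))
      rw [hkeys] at this
      simp only [List.length_append, List.length_cons, List.length_nil] at this ⊢
      omega

-- A's BFS loop: pop (planet, depth) from the queue, compare, expand via visited dict
def BFSgo (end_ : Int) (adjList : List (Int × List Int)) :
    List (Int × Int) → PySem.Dict Int Bool → Option Int
  | [], _ => none
  | (p, d) :: rest, visited =>
    if p = end_ then some d
    else
      match hadj : pvAdjGet adjList p with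
      | none => BFSgo end_ adjList rest visited
      | some nbs =>
        let st := List.foldl (BFSvisitA d) (rest, visited) nbs
        BFSgo end_ adjList st.1 st.2
termination_by q visited => 2 * pvRem adjList visited.keys + q.length
decreasing_by
  · simp only [List.length_cons]; omega
  · have := foldA_bound adjList d nbs rest visited (pvAdjGet_subset adjList p nbs hadj)
    simp only [List.length_cons]
    omega

def BFS (start : Int) (end_ : Int) (adjList : List (Int × List Int)) : Option Int :=
  BFSgo end_ adjList [(start, 0)] PySem.Dict.empty

-- ===== PORT B =====
-- body of B's inner 'for nb in adjList[node]' loop (visited is a set)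
def BFSvisitB (st : List Int × PySem.Set Int) (nb : Int) : List Int × PySem.Set Int :=
  if nb ∈ st.2 then st else (st.1 ++ [nb], PySem.Set.add st.2 nb)

-- body of B's 'for node in frontier' loop
def BFSexpand (adjList : List (Int × List Int)) (st : List Int × PySem.Set Int)
    (node : Int) : List Int × PySem.Set Int :=
  match pvAdjGet adjList node with
  | none => st
  | some nbs => List.foldl BFSvisitB st nbs

lemma foldBv_bound (adjList : List (Int × List Int)) :
    ∀ (nbs : List Int) (nf : List Int) (vis : PySem.Set Int),
    (∀ x ∈ nbs, x ∈ adjList.flatMap Prod.snd) →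
    2 * pvRem adjList (List.foldl BFSvisitB (nf, vis) nbs).2
        + (List.foldl BFSvisitB (nf, vis) nbs).1.length
      ≤ 2 * pvRem adjList vis + nf.length := by
  intro nbs
  induction nbs with
  | nil => intro nf vis _; simp
  | cons nb nbs ih =>
    intro nf vis hsub
    simp only [List.foldl_cons]
    by_cases hm : nb ∈ vis
    · simp only [BFSvisitB, hm, if_true]
      exact ih nf vis (fun x hx => hsub x (List.mem_cons_of_mem _ hx))
    · simp only [BFSvisitB, hm, if_false]
      have hadd : PySem.Set.add vis nb = vis ++ [nb] := by
        simp [PySem.Set.add, PySem.Set.contains, hm]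
      have hrem : pvRem adjList (vis ++ [nb]) + 1 = pvRem adjList vis :=
        pvRem_snoc adjList vis nb (hsub nb (List.mem_cons_self)) hm
      rw [hadd]
      have := ih (nf ++ [nb]) (vis ++ [nb])
        (fun x hx => hsub x (List.mem_cons_of_mem _ hx))
      simp only [List.length_append, List.length_cons, List.length_nil] at this ⊢
      omega

lemma foldB_bound (adjList : List (Int × List Int)) :
    ∀ (frontier : List Int) (nf : List Int) (vis : PySem.Set Int),
    2 * pvRem adjList (List.foldl (BFSexpand adjList) (nf, vis) frontier).2
        + (List.foldl (BFSexpand adjList) (nf, vis) frontier).1.length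
      ≤ 2 * pvRem adjList vis + nf.length := by
  intro frontier
  induction frontier with
  | nil => intro nf vis; simp
  | cons node rest ih =>
    intro nf vis
    simp only [List.foldl_cons]
    cases hadj : pvAdjGet adjList node with
    | none => simp only [BFSexpand, hadj]; exact ih nf vis
    | some nbs =>
      simp only [BFSexpand, hadj]
      calc 2 * pvRem adjList (List.foldl (BFSexpand adjList) (List.foldl BFSvisitB (nf, vis) nbs) rest).2
              + (List.foldl (BFSexpand adjList) (List.foldl BFSvisitB (nf, vis) nbs) rest).1.length
          ≤ 2 * pvRem adjList (List.foldl BFSvisitB (nf, vis) nbs).2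
              + (List.foldl BFSvisitB (nf, vis) nbs).1.length := by
            have := ih (List.foldl BFSvisitB (nf, vis) nbs).1 (List.foldl BFSvisitB (nf, vis) nbs).2
            simpa using this
        _ ≤ 2 * pvRem adjList vis + nf.length :=
            foldBv_bound adjList nbs nf vis (pvAdjGet_subset adjList node nbs hadj)

-- B's outer 'while frontier' loop: one whole level per iteration
def BFSlevels (end_ : Int) (adjList : List (Int × List Int))
    (frontier : List Int) (depth : Int) (visited : PySem.Set Int) : Option Int :=
  if h : frontier = [] then none
  else if end_ ∈ frontier then some depth
  else
    let st := List.foldl (BFSexpand adjList) ([], visited) frontier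
    BFSlevels end_ adjList st.1 (depth + 1) st.2
termination_by 2 * pvRem adjList visited + frontier.length
decreasing_by
  simp only [List.foldl_attach]
  have := foldB_bound adjList frontier [] visited
  have hlen : 0 < frontier.length := List.length_pos_iff.mpr h
  simp only [List.length_nil] at this
  omega

def BFS_alt (start : Int) (end_ : Int) (adjList : List (Int × List Int)) : Option Int :=
  BFSlevels end_ adjList [start] 0 (PySem.Set.ofList [])

-- ===== PRECONDITION & SPEC =====
def Spec_BFS (start : Int) (end_ : Int) (adjList : List (Int × List Int)) (out : Option Int) : Prop := out = BFS_alt start end_ adjList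
instance (start : Int) (end_ : Int) (adjList : List (Int × List Int)) (out : Option Int) : Decidable (Spec_BFS start end_ adjList out) := by unfold Spec_BFS; infer_instance

-- ===== CLAIM (what is proved, stated in full; the proofs are below) =====
def Claim_equal_BFS : Prop := ∀ (start : Int) (end_ : Int) (adjList : List (Int × List Int)), Dom_BFS start end_ adjList → Spec_BFS start end_ adjList (BFS start end_ adjList)

-- ===== LEMMAS AND PROOFS =====

-- A's inner fold only appends to the queue
lemma foldA_shape (d : Int) : ∀ (nbs : List Int) (q : List (Int × Int)) (v : PySem.Dict Int Bool),
    ∃ ex, (List.foldl (BFSvisitA d) (q, v) nbs).1 = q ++ ex := by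
  intro nbs
  induction nbs with
  | nil => intro q v; exact ⟨[], by simp⟩
  | cons nb nbs ih =>
    intro q v
    simp only [List.foldl_cons]
    by_cases hc : v.contains nb = true
    · simpa [BFSvisitA, hc] using ih q v
    · simp only [BFSvisitA, hc, if_false, Bool.false_eq_true]
      rcases ih (q ++ [(nb, d + 1)]) (v.insert nb true) with ⟨ex, hex⟩
      exact ⟨(nb, d + 1) :: ex, by simpa using hex⟩

-- if the target is in the current level, A returns the current depth
lemma hit_lemma (end_ : Int) (adjList : List (Int × List Int)) (d : Int) :
    ∀ (cur : List Int) (tp : List (Int × Int)) (v : PySem.Dict Int Bool), end_ ∈ cur →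
    BFSgo end_ adjList (cur.map (fun c => (c, d)) ++ tp) v = some d := by
  intro cur
  induction cur with
  | nil => intro tp v h; cases h
  | cons c rest ih =>
    intro tp v h
    simp only [List.map_cons, List.cons_append]
    rw [BFSgo]
    by_cases hce : c = end_
    · simp [hce]
    · have hre : end_ ∈ rest := by
        rcases List.mem_cons.mp h with h' | h'
        · exact absurd h'.symm hce
        · exact h'
      simp only [hce, if_false]
      cases hadj : pvAdjGet adjList c with
      | none => simpa [hadj] using ih tp v hre
      | some nbs =>
        simp only [hadj]
        rcases foldA_shape d nbs (rest.map (fun c => (c, d)) ++ tp) v with ⟨ex, hex⟩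
        have := ih (tp ++ ex) (List.foldl (BFSvisitA d) (rest.map (fun c => (c, d)) ++ tp, v) nbs).2 hre
        simpa [hex] using this

-- one neighbour-list expansion: A's (queue, dict) fold simulates B's (frontier, set) fold
lemma inner_sim (d : Int) : ∀ (nbs : List Int) (X : List (Int × Int)) (acc : List Int)
    (v : PySem.Dict Int Bool) (vis : PySem.Set Int), v.keys = vis →
    (List.foldl (BFSvisitA d) (X ++ acc.map (fun c => (c, d + 1)), v) nbs).1
        = X ++ ((List.foldl BFSvisitB (acc, vis) nbs).1).map (fun c => (c, d + 1))
    ∧ (List.foldl (BFSvisitA d) (X ++ acc.map (fun c => (c, d + 1)), v) nbs).2.keys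
        = (List.foldl BFSvisitB (acc, vis) nbs).2 := by
  intro nbs
  induction nbs with
  | nil => intro X acc v vis h; exact ⟨rfl, h⟩
  | cons nb nbs ih =>
    intro X acc v vis h
    simp only [List.foldl_cons]
    by_cases hm : nb ∈ vis
    · have hcv : v.contains nb = true := (PySem.Dict.contains_iff_mem_keys _ _).mpr (h ▸ hm)
      simp only [BFSvisitA, BFSvisitB, hcv, hm, if_true]
      exact ih X acc v vis h
    · have hcv : ¬ v.contains nb = true := fun hc =>
        hm (h ▸ (PySem.Dict.contains_iff_mem_keys _ _).mp hc)
      simp only [BFSvisitA, BFSvisitB, hcv, hm, if_false, Bool.false_eq_true]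
      have hadd : PySem.Set.add vis nb = vis ++ [nb] := by
        simp [PySem.Set.add, PySem.Set.contains, hm]
      have hkeys : (v.insert nb true).keys = vis ++ [nb] := by
        rw [PySem.Dict.keys_insert_of_not_contains _ _ (by simpa using hcv), h]
      have := ih X (acc ++ [nb]) (v.insert nb true) (vis ++ [nb]) hkeys
      rw [hadd]
      simpa [List.append_assoc] using this

-- A processes one whole level exactly as B's nextFrontier construction
lemma level_sim (end_ : Int) (adjList : List (Int × List Int)) (d : Int) :
    ∀ (cur tl acc : List Int) (v : PySem.Dict Int Bool) (vis : PySem.Set Int),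
    v.keys = vis → end_ ∉ cur →
    ∃ w : PySem.Dict Int Bool,
      BFSgo end_ adjList (cur.map (fun c => (c, d)) ++ (tl ++ acc).map (fun c => (c, d + 1))) v
        = BFSgo end_ adjList
            ((tl ++ (List.foldl (BFSexpand adjList) (acc, vis) cur).1).map (fun c => (c, d + 1))) w
      ∧ w.keys = (List.foldl (BFSexpand adjList) (acc, vis) cur).2 := by
  intro cur
  induction cur with
  | nil => intro tl acc v vis h _; exact ⟨v, by simp, h⟩
  | cons c rest ih =>
    intro tl acc v vis h hne
    have hce : ¬ (c = end_) := fun hc => hne (by simp [hc])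
    have hnr : end_ ∉ rest := fun hr => hne (List.mem_cons_of_mem _ hr)
    simp only [List.map_cons, List.cons_append]
    rw [BFSgo]
    simp only [hce, if_false, List.foldl_cons]
    cases hadj : pvAdjGet adjList c with
    | none =>
      have hexp : BFSexpand adjList (acc, vis) c = (acc, vis) := by
        simp [BFSexpand, hadj]
      rw [hexp]
      exact ih tl acc v vis h hnr
    | some nbs =>
      dsimp only
      have hexp : BFSexpand adjList (acc, vis) c = List.foldl BFSvisitB (acc, vis) nbs := by
        simp [BFSexpand, hadj]
      have hsplit : rest.map (fun c => (c, d)) ++ (tl ++ acc).map (fun c => (c, d + 1))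
          = (rest.map (fun c => (c, d)) ++ tl.map (fun c => (c, d + 1)))
              ++ acc.map (fun c => (c, d + 1)) := by
        simp [List.map_append, List.append_assoc]
      rw [hsplit]
      rcases inner_sim d nbs (rest.map (fun c => (c, d)) ++ tl.map (fun c => (c, d + 1)))
        acc v vis h with ⟨h1, h2⟩
      rw [h1]
      have hre : rest.map (fun c => (c, d)) ++ tl.map (fun c => (c, d + 1))
            ++ ((List.foldl BFSvisitB (acc, vis) nbs).1).map (fun c => (c, d + 1))
          = rest.map (fun c => (c, d))
            ++ (tl ++ (List.foldl BFSvisitB (acc, vis) nbs).1).map (fun c => (c, d + 1)) := by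
        simp [List.map_append, List.append_assoc]
      rw [hre, hexp]
      have := ih tl (List.foldl BFSvisitB (acc, vis) nbs).1
        (List.foldl (BFSvisitA d) (rest.map (fun c => (c, d)) ++ tl.map (fun c => (c, d + 1))
          ++ acc.map (fun c => (c, d + 1)), v) nbs).2
        (List.foldl BFSvisitB (acc, vis) nbs).2 (by simpa [List.append_assoc] using h2) hnr
      simpa using this

-- main simulation: A started on a uniform-depth queue equals B's level loop
lemma main_sim (end_ : Int) (adjList : List (Int × List Int)) :
    ∀ (n : Nat) (frontier : List Int) (d : Int) (vis : PySem.Set Int) (v : PySem.Dict Int Bool),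
    2 * pvRem adjList vis + frontier.length ≤ n → v.keys = vis →
    BFSgo end_ adjList (frontier.map (fun c => (c, d))) v = BFSlevels end_ adjList frontier d vis := by
  intro n
  induction n with
  | zero =>
    intro frontier d vis v hle _
    have hf : frontier = [] := by
      cases frontier with
      | nil => rfl
      | cons a l => simp at hle
    subst hf
    simp only [List.map_nil]
    rw [BFSgo, BFSlevels]
    simp
  | succ n ih =>
    intro frontier d vis v hle h
    by_cases hf : frontier = []
    · subst hf; simp only [List.map_nil]; rw [BFSgo, BFSlevels]; simp
    · by_cases he : end_ ∈ frontier
      · rw [BFSlevels]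
        simp only [hf, he, dite_eq_ite, if_false, if_true]
        have := hit_lemma end_ adjList d frontier [] v he
        simpa using this
      · rw [BFSlevels]
        simp only [hf, he, dite_eq_ite, if_false]
        rcases level_sim end_ adjList d frontier [] [] v vis h he with ⟨w, h1, h2⟩
        have hb := foldB_bound adjList frontier [] vis
        simp only [List.length_nil, Nat.add_zero] at hb
        have hlen : 0 < frontier.length := List.length_pos_iff.mpr hf
        have hih := ih (List.foldl (BFSexpand adjList) ([], vis) frontier).1 (d + 1)
          (List.foldl (BFSexpand adjList) ([], vis) frontier).2 w (by omega) h2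
        simp only [List.map_nil, List.append_nil, List.nil_append] at h1
        rw [h1, hih]

-- ===== VERDICT (by name: the statement is the Claim_ definition above) =====
theorem BFS_spec : Claim_equal_BFS := by
  intro start end_ adjList _
  unfold Spec_BFS BFS BFS_alt
  have := main_sim end_ adjList (2 * pvRem adjList [] + 1) [start] 0 (PySem.Set.ofList [])
    PySem.Dict.empty (by simp [PySem.Set.ofList]) (by simp)
  simpa [PySem.Set.ofList] using this
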